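-- pv_equiv track=rewrite | github.com/seanmchu/algo-research | matching/matching_helpers.py | matrix_to_matching
-- ===== SOURCE A (Python) =====
-- def matrix_to_matching(matrix):
--     m1 = [-1] * len(matrix)
--     m2 = [-1] * len(matrix[0])
--     for i in range(0,len(matrix)):
--         for j in range(0,len(matrix[i])):
--             if (matrix[i][j] == 1):
--                 m1[i] = j
--                 m2[j] = i
--     return m1,m2
-- ===== SOURCE B (Python) =====
-- def matrix_to_matching(matrix):
--     m1 = [next((j for j in range(len(row) - 1, -1, -1) if row[j] == 1), -1)
--           for row in matrix]
--     m2 = [-1] * len(matrix[0])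
--     for i, row in enumerate(matrix):
--         for j, v in enumerate(row):
--             if v == 1:
--                 m2[j] = i
--     return m1, m2
-- ===== Notes on version B (the rewrite author's own statement) =====
-- stated objective: alternative
-- what changed: Splits A's single nested loop mutating both arrays into two independent passes: m1 is a per-row back-to-front scan (a comprehension with no mutation), and m2 is built by a separate enumerate-based pass over the rows.
import Mathlib
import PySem

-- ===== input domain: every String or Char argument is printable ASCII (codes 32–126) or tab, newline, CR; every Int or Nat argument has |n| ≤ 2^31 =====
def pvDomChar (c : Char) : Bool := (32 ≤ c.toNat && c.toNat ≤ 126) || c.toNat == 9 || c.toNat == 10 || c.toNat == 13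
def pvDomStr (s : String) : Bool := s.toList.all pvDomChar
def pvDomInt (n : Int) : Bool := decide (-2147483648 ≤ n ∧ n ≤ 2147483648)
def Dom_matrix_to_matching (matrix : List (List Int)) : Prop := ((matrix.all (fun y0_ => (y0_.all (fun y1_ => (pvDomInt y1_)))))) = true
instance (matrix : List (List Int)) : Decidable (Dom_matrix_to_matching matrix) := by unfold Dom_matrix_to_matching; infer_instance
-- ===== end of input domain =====

-- B splits A's single nested loop mutating both arrays into two independent passes (m1 by a
-- per-row back-to-front scan without mutation, m2 by a separate enumerate pass); alternative decomposition.


-- ===== PORT A =====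
-- literal transliteration of A: two replicate(-1) arrays, nested index loops, in-place set
def matrix_to_matching (matrix : List (List Int)) : List Int × List Int :=
  let m1 : List Int := List.replicate matrix.length (-1)
  let m2 : List Int := List.replicate matrix.headI.length (-1)
  (List.range matrix.length).foldl
    (fun (st : List Int × List Int) i =>
      (List.range (matrix.getD i []).length).foldl
        (fun (st : List Int × List Int) j =>
          if (matrix.getD i []).getD j 0 = 1 then (st.1.set i (j : Int), st.2.set j (i : Int))
          else st)
        st)
    (m1, m2)

-- ===== PORT B =====
-- last j (scanning back-to-front, as B's reversed-range generator does) with row[j] == 1, else -1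
def pvRowLast (row : List Int) : Int :=
  match (List.range row.length).reverse.find? (fun j => row.getD j 0 == 1) with
  | some j => (j : Int)
  | none => -1

def matrix_to_matching_alt (matrix : List (List Int)) : List Int × List Int :=
  let m1 : List Int := matrix.map pvRowLast
  let m2 : List Int :=
    matrix.zipIdx.foldl
      (fun (m2 : List Int) p =>
        p.1.zipIdx.foldl
          (fun (m2 : List Int) q => if q.1 = 1 then m2.set q.2 (p.2 : Int) else m2)
          m2)
      (List.replicate matrix.headI.length (-1))
  (m1, m2)

-- ===== PRECONDITION & SPEC =====
-- Pre_ excludes exactly the inputs where Python A raises IndexError (B raises there too): the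
-- empty matrix (matrix[0]) and ragged matrices with a 1 in some row at a column ≥ len(matrix[0]).
def Pre_matrix_to_matching (matrix : List (List Int)) : Prop :=
  matrix ≠ [] ∧ ∀ row ∈ matrix, (1 : Int) ∉ row.drop matrix.headI.length
instance (matrix : List (List Int)) : Decidable (Pre_matrix_to_matching matrix) := by
  unfold Pre_matrix_to_matching; infer_instance

def pvWitness_matrix_to_matching : List (List Int) := [[0, 1], [1, 0]]

def Spec_matrix_to_matching (matrix : List (List Int)) (out : List Int × List Int) : Prop :=
  out = matrix_to_matching_alt matrix
instance (matrix : List (List Int)) (out : List Int × List Int) : Decidable (Spec_matrix_to_matching matrix out) := by unfold Spec_matrix_to_matching; infer_instance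

-- ===== CLAIM (what is proved, stated in full; the proofs are below) =====
def Claim_equal_matrix_to_matching : Prop := ∀ (matrix : List (List Int)), Dom_matrix_to_matching matrix → Pre_matrix_to_matching matrix → Spec_matrix_to_matching matrix (matrix_to_matching matrix)

-- ===== LEMMAS AND PROOFS =====

-- 'row has a 1 at j' as a Boolean predicate
def pvHasOne (r : List Int) (j : Nat) : Bool := r.getD j 0 == 1

-- last index below n satisfying p (the value of a back-to-front find over range n)
def pvLastIdx (p : Nat → Bool) : Nat → Option Nat
  | 0 => none
  | n + 1 => if p n then some n else pvLastIdx p n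

theorem find?_reverse_range (p : Nat → Bool) (n : Nat) :
    (List.range n).reverse.find? p = pvLastIdx p n := by
  induction n with
  | zero => rfl
  | succ n ih =>
    rw [List.range_succ, List.reverse_append]
    simp only [List.reverse_cons, List.reverse_nil, List.nil_append, List.singleton_append,
      List.find?, pvLastIdx]
    split <;> simp_all

theorem pvRowLast_eq (r : List Int) :
    pvRowLast r = (match pvLastIdx (pvHasOne r) r.length with
      | some j => (j : Int) | none => -1) := by
  unfold pvRowLast
  rw [show (fun j => r.getD j 0 == 1) = pvHasOne r from rfl, find?_reverse_range]

-- A's inner loop over the first m entries of row r, mutating (m1, m2) at row index i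
def pvInner (r : List Int) (i : Nat) (m : Nat) (st : List Int × List Int) : List Int × List Int :=
  (List.range m).foldl
    (fun (st : List Int × List Int) j =>
      if r.getD j 0 = 1 then (st.1.set i (j : Int), st.2.set j (i : Int)) else st)
    st

theorem pvInner_succ (r : List Int) (i m : Nat) (st : List Int × List Int) :
    pvInner r i (m + 1) st =
      (if r.getD m 0 = 1 then
        ((pvInner r i m st).1.set i (m : Int), (pvInner r i m st).2.set m (i : Int))
       else pvInner r i m st) := by
  unfold pvInner
  rw [List.range_succ, List.foldl_append, List.foldl_cons, List.foldl_nil]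

theorem pvInner_fst (r : List Int) (i m : Nat) (st : List Int × List Int) :
    (pvInner r i m st).1 = (match pvLastIdx (pvHasOne r) m with
      | some j => st.1.set i (j : Int) | none => st.1) := by
  induction m with
  | zero => rfl
  | succ m ih =>
    rw [pvInner_succ]
    by_cases h : r.getD m 0 = 1
    · have hb : pvHasOne r m = true := by unfold pvHasOne; rw [beq_iff_eq]; exact h
      rw [if_pos h]
      simp only [pvLastIdx, hb, if_pos, ih]
      cases pvLastIdx (pvHasOne r) m <;> simp [List.set_set]
    · have hb : pvHasOne r m = false := by unfold pvHasOne; rw [beq_eq_false_iff_ne]; exact h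
      rw [if_neg h, ih]
      simp [pvLastIdx, hb]

-- B's inner pass over the first m entries of row r, mutating only m2
def pvSndInner (r : List Int) (i : Nat) (m : Nat) (m2 : List Int) : List Int :=
  (List.range m).foldl
    (fun (m2 : List Int) j => if r.getD j 0 = 1 then m2.set j (i : Int) else m2) m2

theorem pvInner_snd (r : List Int) (i m : Nat) (st : List Int × List Int) :
    (pvInner r i m st).2 = pvSndInner r i m st.2 := by
  induction m with
  | zero => rfl
  | succ m ih =>
    rw [pvInner_succ]
    unfold pvSndInner
    rw [List.range_succ, List.foldl_append, List.foldl_cons, List.foldl_nil]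
    unfold pvSndInner at ih
    split <;> simp [ih]

-- folding over zipIdx = folding over range with getD
theorem foldl_zipIdx_eq_range {α β : Type} (l : List α) (d : α) (f : β → α × Nat → β) :
    ∀ (k : Nat) (b : β),
      (l.zipIdx k).foldl f b
        = (List.range l.length).foldl (fun b j => f b (l.getD j d, k + j)) b := by
  induction l with
  | nil => intro k b; rfl
  | cons a rest ih =>
    intro k b
    rw [List.zipIdx_cons, List.foldl_cons, ih (k + 1),
      List.length_cons, List.range_succ_eq_map, List.foldl_cons, List.foldl_map]
    congr 1
    funext b' j
    simp [Nat.add_comm, Nat.add_left_comm]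

-- A's outer loop up to row n
def pvOuter (matrix : List (List Int)) (n : Nat) : List Int × List Int :=
  (List.range n).foldl
    (fun (st : List Int × List Int) i =>
      (List.range (matrix.getD i []).length).foldl
        (fun (st : List Int × List Int) j =>
          if (matrix.getD i []).getD j 0 = 1 then (st.1.set i (j : Int), st.2.set j (i : Int))
          else st)
        st)
    (List.replicate matrix.length (-1), List.replicate matrix.headI.length (-1))

theorem pvOuter_succ (matrix : List (List Int)) (n : Nat) :
    pvOuter matrix (n + 1) = pvInner (matrix.getD n []) n (matrix.getD n []).length (pvOuter matrix n) := by
  unfold pvOuter pvInner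
  rw [List.range_succ, List.foldl_append, List.foldl_cons, List.foldl_nil]

theorem pvOuter_fst_len (matrix : List (List Int)) (n : Nat) :
    (pvOuter matrix n).1.length = matrix.length := by
  induction n with
  | zero => simp [pvOuter]
  | succ n ih =>
    rw [pvOuter_succ, pvInner_fst]
    cases pvLastIdx (pvHasOne (matrix.getD n [])) (matrix.getD n []).length <;> simp [ih]

-- first component of A's loop: m1[k] = pvRowLast of row k once row k has been processed
theorem pvOuter_fst_get? (matrix : List (List Int)) (n : Nat) :
    ∀ k, (pvOuter matrix n).1[k]? =
      if k < matrix.length then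
        some (if k < n then pvRowLast (matrix.getD k []) else -1)
      else none := by
  induction n with
  | zero => intro k; simp [pvOuter, List.getElem?_replicate]
  | succ n ih =>
    intro k
    rw [pvOuter_succ, pvInner_fst]
    by_cases hkn : k = n
    · subst hkn
      rw [pvRowLast_eq]
      cases hL : pvLastIdx (pvHasOne (matrix.getD k [])) (matrix.getD k []).length with
      | none =>
        rw [ih k]
        by_cases hkL : k < matrix.length
        · simp [hkL]
        · simp [hkL]
      | some j =>
        rw [List.getElem?_set, pvOuter_fst_len]
        by_cases hkL : k < matrix.length
        · simp [hkL]
        · simp [hkL]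
    · have he : (k < n + 1) ↔ (k < n) := by constructor <;> omega
      cases hL : pvLastIdx (pvHasOne (matrix.getD n [])) (matrix.getD n []).length with
      | none =>
        rw [ih k]
        simp only [he]
      | some j =>
        rw [List.getElem?_set, if_neg (fun h => hkn h.symm), ih k]
        simp only [he]

-- second component of A's loop up to row n, as a fold over m2 alone (= B's outer pass)
theorem pvOuter_snd (matrix : List (List Int)) (n : Nat) :
    (pvOuter matrix n).2 =
      (List.range n).foldl
        (fun (m2 : List Int) i => pvSndInner (matrix.getD i []) i (matrix.getD i []).length m2)
        (List.replicate matrix.headI.length (-1)) := by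
  induction n with
  | zero => rfl
  | succ n ih =>
    rw [pvOuter_succ, pvInner_snd, ih, List.range_succ, List.foldl_append, List.foldl_cons,
      List.foldl_nil]

-- B's m2 pass (enumerate/zipIdx folds) equals the range/getD formulation
theorem alt_snd_eq (matrix : List (List Int)) :
    (matrix_to_matching_alt matrix).2 =
      (List.range matrix.length).foldl
        (fun (m2 : List Int) i => pvSndInner (matrix.getD i []) i (matrix.getD i []).length m2)
        (List.replicate matrix.headI.length (-1)) := by
  show matrix.zipIdx.foldl _ _ = _
  rw [foldl_zipIdx_eq_range matrix ([] : List Int) _ 0]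
  congr 1
  funext m2 i
  rw [Nat.zero_add,
    foldl_zipIdx_eq_range (matrix.getD i []) (0 : Int) _ 0]
  unfold pvSndInner
  congr 1
  funext m2' j
  rw [Nat.zero_add]

theorem matrix_to_matching_eq_alt (matrix : List (List Int)) :
    matrix_to_matching matrix = matrix_to_matching_alt matrix := by
  have hA : matrix_to_matching matrix = pvOuter matrix matrix.length := rfl
  rw [hA]
  refine Prod.ext ?_ ?_
  · apply List.ext_getElem?
    intro k
    rw [pvOuter_fst_get? matrix matrix.length k]
    show _ = (matrix.map pvRowLast)[k]?
    rw [List.getElem?_map]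
    by_cases hk : k < matrix.length
    · rw [List.getElem?_eq_getElem hk]
      simp [hk, List.getD_eq_getElem?_getD]
    · rw [List.getElem?_eq_none (by omega)]
      simp [hk]
  · rw [pvOuter_snd, alt_snd_eq]

-- ===== VERDICT (by name: the statement is the Claim_ definition above) =====
theorem matrix_to_matching_spec : Claim_equal_matrix_to_matching := by
  intro matrix _ _
  unfold Spec_matrix_to_matching
  exact matrix_to_matching_eq_alt matrix
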